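-- pv_equiv track=rewrite | github.com/asweigart/programmedpatterns | book/visualpatterns.py | pattern90
-- ===== SOURCE A (Python) =====
-- def pattern90(size):
--     tess = [
--     r' /    \     ',
--     r'/      \____',
--     r'\      /    ',
--     r' \____/     ',
--     ]
--
--     pattern = ''
--     for y in range(size):
--         for line in tess:
--             pattern += (line * size) + '\n'
--     return pattern
-- ===== SOURCE B (Python) =====
-- def pattern90(size):
--     tess = [
--     r' /    \     ',
--     r'/      \____',
--     r'\      /    ',
--     r' \____/     ',
--     ]
--
--     def rep(s, n):
--         # repeat s n times by binary doubling (n <= 0 -> '')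
--         out = ''
--         while n > 0:
--             if n & 1:
--                 out += s
--             n >>= 1
--             if n:
--                 s += s
--         return out
--
--     block = ''.join(rep(line, size) + '\n' for line in tess)
--     return rep(block, size)
-- ===== Notes on version B (the rewrite author's own statement) =====
-- stated objective: alternative
-- what changed: A's nested loops (outer y-loop, inner per-line loop, each row built with 'line * size' and '+=') are replaced by a rep(s, n) helper that repeats a string by binary doubling over the bits of n (exponentiation-by-squaring on strings), applied once per tess line horizontally and once to the joined block vertically.
import Mathlib
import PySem

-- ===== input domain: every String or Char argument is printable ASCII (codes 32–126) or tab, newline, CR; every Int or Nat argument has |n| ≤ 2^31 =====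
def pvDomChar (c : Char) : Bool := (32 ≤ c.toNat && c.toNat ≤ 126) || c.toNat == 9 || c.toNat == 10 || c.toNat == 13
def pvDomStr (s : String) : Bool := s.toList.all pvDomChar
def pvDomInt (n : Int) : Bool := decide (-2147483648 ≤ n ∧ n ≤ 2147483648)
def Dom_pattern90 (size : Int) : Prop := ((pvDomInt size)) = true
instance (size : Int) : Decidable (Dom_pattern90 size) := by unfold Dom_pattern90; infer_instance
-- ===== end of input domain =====

-- B repeats strings by binary doubling over the bits of the count (exponentiation-by-squaring
-- on strings) instead of A's per-row 'line * size' inside nested accumulation loops (alternative).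


def pvTess : List String :=
  [" /    \\     ",
   "/      \\____",
   "\\      /    ",
   " \\____/     "]

-- Python's 's * n' on strings (empty for n ≤ 0); exact via PySem.List.pyRepeat on the char list
def pvStrMul (s : String) (n : Int) : String := String.ofList (PySem.List.pyRepeat s.toList n)

-- ===== PORT A =====
def pattern90 (size : Int) : String :=
  (PySem.List.pyRange 0 size 1).foldl
    (fun pattern _y =>
      pvTess.foldl (fun p line => p ++ (pvStrMul line size ++ "\n")) pattern)
    ""

-- ===== PORT B =====
-- termination measure for rep's while loop: n >> 1 shrinks n.toNat while 0 < n
theorem pvShiftRight_toNat_lt (n : Int) (h : 0 < n) : (n >>> (1 : Nat)).toNat < n.toNat := by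
  rw [Int.shiftRight_eq_div_pow]; omega

-- Source B's rep(s, n): the while loop over the bits of n ('if n & 1: out += s; n >>= 1;
-- if n: s += s'), on the char list of the string
def pvRepGo (out s : List Char) (n : Int) : List Char :=
  if h : 0 < n then
    pvRepGo (if PySem.Int.band n 1 ≠ 0 then out ++ s else out)
      (if n >>> (1 : Nat) ≠ 0 then s ++ s else s) (n >>> (1 : Nat))
  else out
termination_by n.toNat
decreasing_by exact pvShiftRight_toNat_lt n h

def pvRep (s : List Char) (n : Int) : List Char := pvRepGo [] s n

-- ''.join(rep(line, size) + '\n' for line in tess), then rep(block, size)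
def pattern90_alt (size : Int) : String :=
  let block := PySem.Str.join "" (pvTess.map (fun line => String.ofList (pvRep line.toList size) ++ "\n"))
  String.ofList (pvRep block.toList size)

-- ===== PRECONDITION & SPEC =====
def Spec_pattern90 (size : Int) (out : String) : Prop := out = pattern90_alt size
instance (size : Int) (out : String) : Decidable (Spec_pattern90 size out) := by unfold Spec_pattern90; infer_instance

-- ===== CLAIM (what is proved, stated in full; the proofs are below) =====
def Claim_equal_pattern90 : Prop := ∀ (size : Int), Dom_pattern90 size → Spec_pattern90 size (pattern90 size)

-- ===== LEMMAS AND PROOFS =====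

-- the four-line block, as a char list, that one outer iteration of A appends
def pvBlock (size : Int) : List Char :=
  pvTess.flatMap (fun line => PySem.List.pyRepeat line.toList size ++ ['\n'])

-- appending a constant string k times to acc (String-level fold; no library twin at String)
theorem pv_foldl_range_append (k : Nat) (b acc : String) :
    (List.range k).foldl (fun p _ => p ++ b) acc
      = String.ofList (acc.toList ++ (List.replicate k b.toList).flatten) := by
  induction k generalizing acc with
  | zero => simp
  | succ m ih =>
      rw [List.range_succ, List.foldl_append]
      simp only [List.foldl_cons, List.foldl_nil]
      rw [ih]
      rw [← String.toList_inj]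
      simp [List.replicate_succ']

-- A builds size copies of the block
theorem pvA_char (size : Int) :
    pattern90 size = String.ofList ((List.replicate size.toNat (pvBlock size)).flatten) := by
  unfold pattern90
  rw [PySem.List.pyRange_one]
  simp only [Int.sub_zero, List.foldl_map]
  have hinner : ∀ (p : String),
      pvTess.foldl (fun p line => p ++ (pvStrMul line size ++ "\n")) p
        = p ++ String.ofList (pvBlock size) := by
    intro p
    simp [pvTess, pvBlock, pvStrMul, ← String.toList_inj]
  calc (List.range size.toNat).foldl
        (fun pattern _ => pvTess.foldl (fun p line => p ++ (pvStrMul line size ++ "\n")) pattern) ""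
      = (List.range size.toNat).foldl
          (fun pattern _ => pattern ++ String.ofList (pvBlock size)) "" := by
        exact PySem.List.foldl_congr_mem _ _ _ _ (fun a x _ => hinner a)
    _ = _ := by rw [pv_foldl_range_append]; simp

-- m copies of s ++ s are 2m copies of s
theorem pv_flatten_replicate_double {α : Type} (m : Nat) (s : List α) :
    (List.replicate m (s ++ s)).flatten = (List.replicate (2 * m) s).flatten := by
  induction m with
  | zero => simp
  | succ p ih =>
      rw [List.replicate_succ, List.flatten_cons, ih,
        show 2 * (p + 1) = 2 + 2 * p by ring, List.replicate_add]
      simp [List.replicate]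

-- invariant of the doubling loop: it appends exactly n copies of s
theorem pvRepGo_eq (k : Nat) : ∀ (n : Int), n.toNat = k → ∀ (out s : List Char),
    pvRepGo out s n = out ++ (List.replicate k s).flatten := by
  induction k using Nat.strong_induction_on with
  | _ k ih =>
    intro n hk out s
    rw [pvRepGo]
    by_cases h : 0 < n
    · rw [dif_pos h]
      have hlt := pvShiftRight_toNat_lt n h
      have hdec : n.toNat = 2 * ((n >>> (1 : Nat)).toNat) + (PySem.Int.band n 1).toNat := by
        rw [Int.shiftRight_eq_div_pow, PySem.Int.band_one,
          PySem.Int.mod_eq_emod_of_pos (by norm_num)]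
        omega
      have hband : PySem.Int.band n 1 = 0 ∨ PySem.Int.band n 1 = 1 := by
        rw [PySem.Int.band_one, PySem.Int.mod_eq_emod_of_pos (by norm_num)]
        omega
      rw [ih (n >>> (1 : Nat)).toNat (by omega) _ rfl]
      by_cases h0 : (n >>> (1 : Nat)) = 0
      · have hb1 : PySem.Int.band n 1 = 1 := by
          rcases hband with hb | hb
          · exfalso; omega
          · exact hb
        rw [if_pos (by rw [hb1]; norm_num : PySem.Int.band n 1 ≠ 0)]
        simp [h0, show k = 1 by omega]
      · rw [if_pos h0]
        rcases hband with hb | hb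
        · rw [if_neg (by simp [hb])]
          rw [pv_flatten_replicate_double, show 2 * (n >>> (1 : Nat)).toNat = k by omega]
        · rw [if_pos (by rw [hb]; norm_num : PySem.Int.band n 1 ≠ 0)]
          rw [pv_flatten_replicate_double, show k = 1 + 2 * (n >>> (1 : Nat)).toNat by omega,
            List.replicate_add, List.flatten_append]
          simp [List.replicate, List.append_assoc]
    · rw [dif_neg h]
      simp [show k = 0 by omega]

theorem pvRep_eq (s : List Char) (n : Int) :
    pvRep s n = (List.replicate n.toNat s).flatten := by
  rw [pvRep, pvRepGo_eq n.toNat n rfl]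
  simp

-- B builds the same size copies of the block
theorem pvB_char (size : Int) :
    pattern90_alt size
      = String.ofList ((List.replicate size.toNat (pvBlock size)).flatten) := by
  unfold pattern90_alt
  have hblock :
      (PySem.Str.join ""
        (pvTess.map (fun line => String.ofList (pvRep line.toList size) ++ "\n"))).toList
        = pvBlock size := by
    simp [pvTess, pvBlock, pvRep_eq, PySem.List.pyRepeat, PySem.Str.join, PySem.Chars.join,
      List.intercalate]
  simp only [pvRep_eq] at hblock ⊢
  rw [hblock]

-- ===== VERDICT (by name: the statement is the Claim_ definition above) =====
theorem pattern90_spec : Claim_equal_pattern90 := by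
  intro size _
  unfold Spec_pattern90
  rw [pvA_char, pvB_char]
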